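-- pv_equiv track=rewrite | github.com/ioaksenenko/neural_networks | utilities/datamaker/versions/v2.0/main.py | text_input_question_generate
-- ===== SOURCE A (Python) =====
-- def text_input_question_generate(n=1, is_item=True):
--     inputs = []
--     outputs = []
--     for i in range(n):
--         input = "_"
--         output = ("[item]" if is_item else "") + "_ "
--         for j in range(i+1):
--             input += ' {=_} _'
--             if j == 0 and j == i:
--                 output += "[textinput][answer]_[/answer][/textinput] "
--             elif j == 0:
--                 output += "[textinput][answer]_[/answer] _ "
--             elif j == i:
--                 output += "[answer]_[/answer][/textinput] "
--             else:
--                 output += "[answer]_[/answer] _ "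
--         output += "_" + ("[/item]" if is_item else "")
--         inputs.append(input)
--         outputs.append(output)
--     return inputs, outputs
-- ===== SOURCE B (Python) =====
-- def text_input_question_generate(n=1, is_item=True):
--     pre, suf = ("[item]", "[/item]") if is_item else ("", "")
--     inputs = ["_" + " {=_} _" * (i + 1) for i in range(n)]
--     outputs = [pre + "_ [textinput]"
--                + " _ ".join(["[answer]_[/answer]"] * (i + 1))
--                + "[/textinput] _" + suf
--                for i in range(n)]
--     return inputs, outputs
-- ===== Notes on version B (the rewrite author's own statement) =====
-- stated objective: simpler
-- what changed: The nested j-loop with its four-way positional conditional is removed: each input row is string multiplication and each output row is built in closed form with a join over replicated answer cells.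
import Mathlib
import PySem

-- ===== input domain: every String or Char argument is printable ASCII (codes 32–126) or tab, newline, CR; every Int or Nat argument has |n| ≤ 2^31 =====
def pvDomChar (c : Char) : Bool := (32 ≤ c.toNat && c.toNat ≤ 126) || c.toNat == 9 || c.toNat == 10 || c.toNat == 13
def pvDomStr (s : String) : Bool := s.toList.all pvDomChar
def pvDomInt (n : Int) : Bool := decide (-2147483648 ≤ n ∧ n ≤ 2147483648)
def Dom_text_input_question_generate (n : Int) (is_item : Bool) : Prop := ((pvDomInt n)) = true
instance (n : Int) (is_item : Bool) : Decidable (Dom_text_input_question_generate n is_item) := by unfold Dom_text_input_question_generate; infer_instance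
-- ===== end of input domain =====

-- B replaces the nested j-loop and its four-way positional conditional by closed-form rows
-- (string multiplication for the input, a join over replicated answer cells for the output); objective: simpler.

-- ===== PORT A =====
-- inner j-loop body of A, kept as a named helper
def tiqInnerStep (i : Int) (p : String × String) (j : Int) : String × String :=
  ( p.1 ++ " {=_} _",
    p.2 ++ (if j == 0 && j == i then "[textinput][answer]_[/answer][/textinput] "
            else if j == 0 then "[textinput][answer]_[/answer] _ "
            else if j == i then "[answer]_[/answer][/textinput] "
            else "[answer]_[/answer] _ ") )

def text_input_question_generate (n : Int) (is_item : Bool) : List String × List String :=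
  (PySem.List.pyRange 0 n 1).foldl
    (fun (acc : List String × List String) i =>
      let p := (PySem.List.pyRange 0 (i+1) 1).foldl (tiqInnerStep i)
                 ("_", (if is_item then "[item]" else "") ++ "_ ")
      (acc.1 ++ [p.1], acc.2 ++ [p.2 ++ "_" ++ (if is_item then "[/item]" else "")]))
    ([], [])

-- ===== PORT B =====
-- hand port of Python's  s * k  for a string and a nonnegative count
def tiqStrMulN (s : String) : Nat → String
  | 0 => ""
  | Nat.succ m => s ++ tiqStrMulN s m

def tiqStrMul (s : String) (k : Int) : String := tiqStrMulN s k.toNat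

def text_input_question_generate_alt (n : Int) (is_item : Bool) : List String × List String :=
  let pre := if is_item then "[item]" else ""
  let suf := if is_item then "[/item]" else ""
  ( (PySem.List.pyRange 0 n 1).map (fun i => "_" ++ tiqStrMul " {=_} _" (i+1)),
    (PySem.List.pyRange 0 n 1).map (fun i =>
      pre ++ "_ [textinput]"
        ++ PySem.Str.join " _ " (List.replicate (i+1).toNat "[answer]_[/answer]")
        ++ "[/textinput] _" ++ suf) )

-- ===== PRECONDITION & SPEC =====
def Spec_text_input_question_generate (n : Int) (is_item : Bool) (out : List String × List String) : Prop := out = text_input_question_generate_alt n is_item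
instance (n : Int) (is_item : Bool) (out : List String × List String) : Decidable (Spec_text_input_question_generate n is_item out) := by unfold Spec_text_input_question_generate; infer_instance

-- ===== CLAIM (what is proved, stated in full; the proofs are below) =====
def Claim_equal_text_input_question_generate : Prop := ∀ (n : Int) (is_item : Bool), Dom_text_input_question_generate n is_item → Spec_text_input_question_generate n is_item (text_input_question_generate n is_item)

-- ===== LEMMAS AND PROOFS =====

-- s = t follows from equal character lists
theorem strext {s t : String} (h : s.toList = t.toList) : s = t :=
  String.ext (by simpa [String.toList] using h)

-- k-fold concatenation of a string
def repS : Nat → String → String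
  | 0, _ => ""
  | Nat.succ m, s => s ++ repS m s

theorem tiqStrMul_eq (s : String) (k : Nat) : tiqStrMul s (k : Int) = repS k s := by
  rw [tiqStrMul, show ((k : Int)).toNat = k by omega]
  induction k with
  | zero => rfl
  | succ m ih => simp [tiqStrMulN, repS, ih]

theorem joinRep (sep x : String) (k : Nat) :
    PySem.Str.join sep (List.replicate (k+1) x) = x ++ repS k (sep ++ x) := by
  induction k with
  | zero =>
      refine strext ?_
      simp [PySem.Str.toList_join, PySem.Chars.join_singleton, repS]
  | succ m ih =>
      refine strext ?_
      have h2 : List.replicate (m+1+1) x = x :: x :: List.replicate m x := by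
        simp [List.replicate_succ]
      rw [h2, PySem.Str.toList_join]
      simp only [List.map_cons, PySem.Chars.join_cons_cons]
      have ih' : (PySem.Str.join sep (List.replicate (m+1) x)).toList
          = (x ++ repS m (sep ++ x)).toList := by rw [ih]
      rw [PySem.Str.toList_join,
        show List.replicate (m+1) x = x :: List.replicate m x from by simp [List.replicate_succ]] at ih'
      simp only [List.map_cons] at ih'
      rw [ih']
      simp [repS, List.append_assoc]

theorem rotS (k : Nat) (a s : String) :
    repS k (a ++ s) ++ a = a ++ repS k (s ++ a) := by
  induction k with
  | zero => simp [repS]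
  | succ m ih =>
      simp only [repS, String.append_assoc]
      rw [ih]

-- rotation in right-associated context
theorem rotS' (k : Nat) (a s rest : String) :
    repS k (a ++ s) ++ (a ++ rest) = a ++ (repS k (s ++ a) ++ rest) := by
  rw [← String.append_assoc, rotS, String.append_assoc]

-- the input row of A's inner fold
theorem tiq_inner_fst (i : Int) (l : List Int) : ∀ (p : String × String),
    (l.foldl (tiqInnerStep i) p).1 = p.1 ++ repS l.length " {=_} _" := by
  induction l with
  | nil => intro p; simp [repS]
  | cons x xs ih =>
      intro p
      simp only [List.foldl_cons, List.length_cons]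
      rw [ih]
      simp [tiqInnerStep, repS, String.append_assoc]

-- the output row of A's inner fold over range(1, i+1) (middle cells then the closing cell)
theorem tiq_inner_mid (i : Int) : ∀ (d : Nat) (a : Int), 1 ≤ a → a + d = i → ∀ (p : String × String),
    ((PySem.List.pyRange a (i+1) 1).foldl (tiqInnerStep i) p).2
      = p.2 ++ repS d "[answer]_[/answer] _ " ++ "[answer]_[/answer][/textinput] " := by
  intro d
  induction d with
  | zero =>
      intro a ha hai p
      have : a = i := by omega
      subst this
      rw [PySem.List.pyRange_one_singleton]
      have h0 : (a == 0) = false := by simp; omega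
      simp [tiqInnerStep, h0, repS]
  | succ m ih =>
      intro a ha hai p
      have hlt : a < i + 1 := by omega
      rw [PySem.List.pyRange_one_cons hlt]
      simp only [List.foldl_cons]
      have h0 : (a == 0) = false := by simp; omega
      have hi : (a == i) = false := by simp; omega
      rw [ih (a+1) (by omega) (by omega)]
      simp [tiqInnerStep, h0, hi, repS, String.append_assoc]

-- per-row equality of the output strings
theorem tiq_row_out (i : Int) (hi : 0 ≤ i) (pre suf : String) :
    (((PySem.List.pyRange 0 (i+1) 1).foldl (tiqInnerStep i) ("_", pre ++ "_ ")).2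
        ++ "_" ++ suf)
      = pre ++ "_ [textinput]"
          ++ PySem.Str.join " _ " (List.replicate (i+1).toNat "[answer]_[/answer]")
          ++ "[/textinput] _" ++ suf := by
  rcases eq_or_lt_of_le hi with h0 | hpos
  · -- i = 0 : the single-cell case
    subst h0
    rw [PySem.List.pyRange_one_singleton]
    simp only [List.foldl_cons, List.foldl_nil]
    have hj : PySem.Str.join " _ " (List.replicate ((0:Int)+1).toNat "[answer]_[/answer]")
        = "[answer]_[/answer]" := rfl
    rw [hj]
    simp only [tiqInnerStep]
    norm_num
    have lit : ("_ " : String) ++ "[textinput][answer]_[/answer][/textinput] " ++ "_"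
        = "_ [textinput]" ++ "[answer]_[/answer]" ++ "[/textinput] _" := rfl
    have := congrArg (fun z => pre ++ z ++ suf) lit
    simpa [String.append_assoc] using this
  · -- i ≥ 1 : opening cell, middle cells, closing cell
    have hk : (i+1).toNat = (i-1).toNat + 1 + 1 := by omega
    rw [hk]
    have hcons : PySem.List.pyRange 0 (i+1) 1 = 0 :: PySem.List.pyRange 1 (i+1) 1 :=
      PySem.List.pyRange_one_cons (by omega)
    have h0 : ((0:Int) == 0) = true := by simp
    have hne : ((0:Int) == i) = false := by simp; omega
    rw [hcons]
    simp only [List.foldl_cons, tiqInnerStep, h0, hne, Bool.true_and, Bool.false_eq_true,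
      if_true, if_false]
    rw [tiq_inner_mid i (i-1).toNat 1 (by omega) (by omega)]
    rw [joinRep " _ " "[answer]_[/answer]" ((i-1).toNat + 1)]
    dsimp only
    rw [show repS ((i-1).toNat + 1) (" _ " ++ "[answer]_[/answer]")
          = (" _ " ++ "[answer]_[/answer]") ++ repS (i-1).toNat (" _ " ++ "[answer]_[/answer]")
        from rfl]
    rw [show ("[textinput][answer]_[/answer] _ " : String)
          = "[textinput]" ++ ("[answer]_[/answer]" ++ " _ ") from rfl]
    rw [show ("[answer]_[/answer][/textinput] " : String)
          = "[answer]_[/answer]" ++ "[/textinput] " from rfl]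
    rw [show ("_ [textinput]" : String) = "_ " ++ "[textinput]" from rfl]
    rw [show ("[answer]_[/answer] _ " : String) = "[answer]_[/answer]" ++ " _ " from rfl]
    rw [show ("[/textinput] _" : String) = "[/textinput] " ++ "_" from rfl]
    simp only [String.append_assoc]
    rw [rotS' (i-1).toNat "[answer]_[/answer]" " _ "]

-- a fold that only appends one mapped element to each component is a pair of maps
theorem foldl_push2 (F G : Int → String) (l : List Int) :
    ∀ (a b : List String),
    l.foldl (fun acc x => (acc.1 ++ [F x], acc.2 ++ [G x])) (a, b) = (a ++ l.map F, b ++ l.map G) := by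
  induction l with
  | nil => intro a b; simp
  | cons x xs ih => intro a b; simp [ih]

-- ===== VERDICT (by name: the statement is the Claim_ definition above) =====
theorem text_input_question_generate_spec : Claim_equal_text_input_question_generate := by
  intro n is_item _
  show _ = _
  unfold text_input_question_generate text_input_question_generate_alt
  rw [foldl_push2
    (fun i => ((PySem.List.pyRange 0 (i+1) 1).foldl (tiqInnerStep i)
       ("_", (if is_item then "[item]" else "") ++ "_ ")).1)
    (fun i => ((PySem.List.pyRange 0 (i+1) 1).foldl (tiqInnerStep i)
       ("_", (if is_item then "[item]" else "") ++ "_ ")).2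
       ++ "_" ++ (if is_item then "[/item]" else ""))]
  simp only [List.nil_append, Prod.mk.injEq]
  refine ⟨?_, ?_⟩
  · -- inputs component
    apply List.map_congr_left
    intro i hi
    have h0i : 0 ≤ i := (PySem.List.mem_pyRange_one.mp hi).1
    have h1 : tiqStrMul " {=_} _" (i+1) = repS (i+1).toNat " {=_} _" := by
      rw [show (i + 1 : Int) = (((i+1).toNat : Nat) : Int) by omega, tiqStrMul_eq,
        Int.toNat_natCast]
    rw [tiq_inner_fst, PySem.List.length_pyRange_one, h1]
    norm_num
  · -- outputs component
    apply List.map_congr_left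
    intro i hi
    have h0i : 0 ≤ i := (PySem.List.mem_pyRange_one.mp hi).1
    exact tiq_row_out i h0i (if is_item then "[item]" else "") (if is_item then "[/item]" else "")
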